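-- pv_equiv track=rewrite | github.com/helixphoenix/Python_Code_Challenges | Exercise Files/challenge/pairwise_offset.py | big_offset
-- ===== SOURCE A (Python) =====
-- def big_offset(sequence, fillvalue, offset):
--     tups=[]
--
--     for i in range (0,len(sequence)):
--         tups.append(tuple([sequence[i], fillvalue]))
--     for i in range (len(sequence), offset):
--         tups.append(tuple([fillvalue,fillvalue])  )
--     for i in range (offset, len(sequence)+offset):
--         tups.append(tuple([fillvalue,sequence[i-offset]]) )
--     return tups
-- ===== SOURCE B (Python) =====
-- def big_offset(sequence, fillvalue, offset):
--     n = len(sequence)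
--     pad = n + max(0, offset - n)
--     left = list(sequence) + [fillvalue] * pad
--     right = [fillvalue] * pad + list(sequence)
--     return list(zip(left, right))
-- ===== Notes on version B (the rewrite author's own statement) =====
-- stated objective: idiomatic
-- what changed: Instead of appending rows in three index loops, B builds two flat padded columns (sequence plus fill padding, and the reverse) and transposes them with a single zip.
import Mathlib
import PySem

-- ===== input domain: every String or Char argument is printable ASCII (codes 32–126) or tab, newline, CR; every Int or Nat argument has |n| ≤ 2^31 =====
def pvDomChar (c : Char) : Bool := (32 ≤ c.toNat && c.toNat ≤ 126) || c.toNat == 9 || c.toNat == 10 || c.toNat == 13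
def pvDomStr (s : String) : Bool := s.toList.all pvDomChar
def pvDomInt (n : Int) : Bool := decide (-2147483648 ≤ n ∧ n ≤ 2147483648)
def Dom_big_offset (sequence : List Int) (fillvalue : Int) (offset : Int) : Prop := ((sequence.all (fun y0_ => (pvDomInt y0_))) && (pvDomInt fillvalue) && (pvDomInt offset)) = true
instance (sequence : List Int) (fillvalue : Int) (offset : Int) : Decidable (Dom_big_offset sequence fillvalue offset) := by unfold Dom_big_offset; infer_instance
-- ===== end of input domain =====

-- B builds the two padded columns and transposes them with one zip instead of A's three appending
-- index loops (idiomatic restructuring; same asymptotic cost). A is total; no Pre_ needed.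

-- ===== PORT A =====
-- Literal port of A's three range loops; sequence[i] is always in range here, so pyGetD's default 0 is never read.
def big_offset (sequence : List Int) (fillvalue : Int) (offset : Int) : List (Int × Int) :=
  let tups : List (Int × Int) := []
  let tups := (PySem.List.pyRange 0 (sequence.length : Int) 1).foldl
    (fun acc i => acc ++ [(PySem.List.pyGetD sequence i 0, fillvalue)]) tups
  let tups := (PySem.List.pyRange (sequence.length : Int) offset 1).foldl
    (fun acc _ => acc ++ [(fillvalue, fillvalue)]) tups
  let tups := (PySem.List.pyRange offset ((sequence.length : Int) + offset) 1).foldl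
    (fun acc i => acc ++ [(fillvalue, PySem.List.pyGetD sequence (i - offset) 0)]) tups
  tups

-- ===== PORT B =====
def big_offset_alt (sequence : List Int) (fillvalue : Int) (offset : Int) : List (Int × Int) :=
  let n : Int := (sequence.length : Int)
  let pad : Int := n + max 0 (offset - n)
  let left := sequence ++ PySem.List.pyRepeat [fillvalue] pad
  let right := PySem.List.pyRepeat [fillvalue] pad ++ sequence
  left.zip right

-- ===== PRECONDITION & SPEC =====
def Spec_big_offset (sequence : List Int) (fillvalue : Int) (offset : Int) (out : List (Int × Int)) : Prop := out = big_offset_alt sequence fillvalue offset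
instance (sequence : List Int) (fillvalue : Int) (offset : Int) (out : List (Int × Int)) : Decidable (Spec_big_offset sequence fillvalue offset out) := by unfold Spec_big_offset; infer_instance

-- ===== CLAIM (what is proved, stated in full; the proofs are below) =====
def Claim_equal_big_offset : Prop := ∀ (sequence : List Int) (fillvalue : Int) (offset : Int), Dom_big_offset sequence fillvalue offset → Spec_big_offset sequence fillvalue offset (big_offset sequence fillvalue offset)

-- ===== LEMMAS AND PROOFS =====

theorem map_range_getD (s : List Int) (d : Int) :
    (List.range s.length).map (fun k => s.getD k d) = s := by
  apply List.ext_getElem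
  · simp
  · intro i h1 h2
    simp [List.getD_eq_getElem?_getD, h2]

theorem zip_replicate_right (s : List Int) (f : Int) :
    s.zip (List.replicate s.length f) = s.map (fun x => (x, f)) := by
  induction s with
  | nil => rfl
  | cons a t ih => simp [List.replicate_succ, ih]

theorem zip_replicate_left (s : List Int) (f : Int) :
    (List.replicate s.length f).zip s = s.map (fun x => (f, x)) := by
  induction s with
  | nil => rfl
  | cons a t ih => simp [List.replicate_succ, ih]

-- canonical form shared by the two ports
theorem big_offset_eq_canon (s : List Int) (f off : Int) :
    big_offset s f off =
      s.map (fun x => (x, f)) ++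
      List.replicate (off - (s.length : Int)).toNat (f, f) ++
      s.map (fun x => (f, x)) := by
  simp only [big_offset, PySem.List.foldl_append_singleton_eq_map]
  simp only [List.nil_append, List.append_assoc]
  congr 1
  · have h := PySem.List.map_pyGetD_pyRange_zero' (xs := s) (d := 0)
    calc (PySem.List.pyRange 0 (s.length : Int) 1).map (fun i => (PySem.List.pyGetD s i 0, f))
        = ((PySem.List.pyRange 0 (s.length : Int) 1).map (fun i => PySem.List.pyGetD s i 0)).map
            (fun x => (x, f)) := by rw [List.map_map]; rfl
      _ = s.map (fun x => (x, f)) := by rw [h]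
  congr 1
  · rw [List.map_const']
    simp [PySem.List.length_pyRange_one]
  · rw [PySem.List.pyRange_one]
    rw [List.map_map]
    have hn : ((s.length : Int) + off - off).toNat = s.length := by omega
    rw [hn]
    have : ((fun i => (f, PySem.List.pyGetD s (i - off) 0)) ∘ fun k : Nat => off + (k : Int))
        = fun k : Nat => (f, s.getD k 0) := by
      funext k
      have hk : off + (k : Int) - off = (k : Int) := by omega
      simp [Function.comp, hk]
    rw [this]
    calc (List.range s.length).map (fun k : Nat => (f, s.getD k 0))
        = ((List.range s.length).map (fun k => s.getD k 0)).map (fun x => (f, x)) := by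
          rw [List.map_map]; rfl
      _ = s.map (fun x => (f, x)) := by rw [map_range_getD]

theorem big_offset_alt_eq_canon (s : List Int) (f off : Int) :
    big_offset_alt s f off =
      s.map (fun x => (x, f)) ++
      List.replicate (off - (s.length : Int)).toNat (f, f) ++
      s.map (fun x => (f, x)) := by
  unfold big_offset_alt
  simp only [PySem.List.pyRepeat_singleton]
  set m := s.length with hm
  set p := (off - (m : Int)).toNat with hp
  have hpad : ((m : Int) + max 0 (off - (m : Int))).toNat = m + p := by omega
  rw [hpad]
  have hsplit1 : List.replicate (m + p) f = List.replicate m f ++ List.replicate p f := by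
    rw [List.replicate_add]
  have hsplit2 : List.replicate (m + p) f = List.replicate p f ++ List.replicate m f := by
    rw [Nat.add_comm, List.replicate_add]
  conv_lhs => rw [show (List.replicate (m + p) f ++ s) = List.replicate m f ++ (List.replicate p f ++ s) by rw [hsplit1, List.append_assoc]]
  rw [List.zip_append (by simp [hm])]
  rw [hsplit2, List.zip_append (by simp)]
  rw [hm, zip_replicate_right, zip_replicate_left]
  simp [List.append_assoc]

-- ===== VERDICT (by name: the statement is the Claim_ definition above) =====
theorem big_offset_spec : Claim_equal_big_offset := by
  intro s f off _
  unfold Spec_big_offset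
  rw [big_offset_eq_canon, big_offset_alt_eq_canon]
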